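-- pv_equiv track=rewrite | github.com/sampsyo/bril | examples/lvn.py | last_writes
-- ===== SOURCE A (Python) =====
-- def last_writes(instrs):
--     """Given a block of instructions, return a list of bools---one per
--     instruction---that indicates whether that instruction is the last
--     write for its variable.
--     """
--     out = [False] * len(instrs)
--     seen = set()
--     for idx, instr in reversed(list(enumerate(instrs))):
--         if 'dest' in instr:
--             dest = instr['dest']
--             if dest not in seen:
--                 out[idx] = True
--                 seen.add(instr['dest'])
--     return out
-- ===== SOURCE B (Python) =====
-- def last_writes(instrs):
--     """Two forward passes: build a var -> last-write-index table, then mark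
--     those indices."""
--     last = {}
--     for idx, instr in enumerate(instrs):
--         if 'dest' in instr:
--             last[instr['dest']] = idx
--     out = [False] * len(instrs)
--     for idx in last.values():
--         out[idx] = True
--     return out
-- ===== Notes on version B (the rewrite author's own statement) =====
-- stated objective: alternative
-- what changed: Replaced the single reverse scan with a seen-set (marking an index when its dest is unseen) by two forward passes: build a dict mapping each dest to its latest write index, then mark exactly the indices stored in the dict's values.
import Mathlib
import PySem

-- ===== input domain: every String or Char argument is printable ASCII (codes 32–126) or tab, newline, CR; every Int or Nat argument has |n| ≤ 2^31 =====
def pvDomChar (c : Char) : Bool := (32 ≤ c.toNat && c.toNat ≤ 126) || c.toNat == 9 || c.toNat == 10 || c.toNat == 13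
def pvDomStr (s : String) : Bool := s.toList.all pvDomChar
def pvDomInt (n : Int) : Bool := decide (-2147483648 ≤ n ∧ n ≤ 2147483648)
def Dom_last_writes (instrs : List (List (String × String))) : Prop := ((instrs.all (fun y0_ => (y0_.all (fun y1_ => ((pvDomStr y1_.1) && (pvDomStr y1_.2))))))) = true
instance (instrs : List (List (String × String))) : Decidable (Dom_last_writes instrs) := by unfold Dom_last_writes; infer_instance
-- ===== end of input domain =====

-- B replaces A's reverse scan with a seen-set by two forward passes: build a
-- var → last-write-index dict, then mark its values (alternative decomposition, same cost).

-- shared helper: `'dest' in instr` / `instr['dest']` on the dict argument (first-match lookup)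
def pvGetDest (instr : List (String × String)) : Option String :=
  PySem.Dict.get? (PySem.Dict.mk instr) "dest"

-- ===== PORT A =====
-- loop body of A: state = (out, seen); `if 'dest' in instr: … if dest not in seen: out[idx]=True; seen.add(dest)`
def pvStepA (st : List Bool × PySem.Set String) (p : Int × List (String × String)) :
    List Bool × PySem.Set String :=
  match pvGetDest p.2 with
  | some dest =>
      if PySem.Set.contains st.2 dest then st
      else (PySem.List.pySetD st.1 p.1 true, PySem.Set.add st.2 dest)
  | none => st

def last_writes (instrs : List (List (String × String))) : List Bool :=
  (((PySem.List.enumerate instrs).reverse).foldl pvStepA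
    (List.replicate instrs.length false, PySem.Set.empty)).1

-- ===== PORT B =====
-- first pass of B: `last[instr['dest']] = idx` over enumerate(instrs)
def pvStepB (d : PySem.Dict String Int) (p : Int × List (String × String)) :
    PySem.Dict String Int :=
  match pvGetDest p.2 with
  | some dest => d.insert dest p.1
  | none => d

-- second pass of B: `out[idx] = True`
def pvMark (out : List Bool) (i : Int) : List Bool := PySem.List.pySetD out i true

def last_writes_alt (instrs : List (List (String × String))) : List Bool :=
  ((((PySem.List.enumerate instrs).foldl pvStepB PySem.Dict.empty).values).foldl pvMark
    (List.replicate instrs.length false))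

-- ===== PRECONDITION & SPEC =====
def Spec_last_writes (instrs : List (List (String × String))) (out : List Bool) : Prop := out = last_writes_alt instrs
instance (instrs : List (List (String × String))) (out : List Bool) : Decidable (Spec_last_writes instrs out) := by unfold Spec_last_writes; infer_instance

-- ===== CLAIM (what is proved, stated in full; the proofs are below) =====
def Claim_equal_last_writes : Prop := ∀ (instrs : List (List (String × String))), Dom_last_writes instrs → Spec_last_writes instrs (last_writes instrs)

-- ===== LEMMAS AND PROOFS =====

-- `pvLastIdx l k = some j` iff instruction j is the last one in l whose dest is k
def pvLastIdx : List (List (String × String)) → String → Option Nat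
  | [], _ => none
  | x :: rest, k =>
    match pvLastIdx rest k with
    | some j => some (j + 1)
    | none => if pvGetDest x = some k then some 0 else none

-- reference answer: entry i is true iff instr i writes a var no later instr writes
def pvSpec : List (List (String × String)) → List Bool
  | [] => []
  | x :: rest =>
    (match pvGetDest x with
     | some d => decide (pvLastIdx rest d = none)
     | none => false) :: pvSpec rest

theorem pvLastIdx_cons_ne_none (y : List (String × String)) (rest : List (List (String × String))) (d : String) :
    pvLastIdx (y :: rest) d ≠ none ↔ pvLastIdx rest d ≠ none ∨ pvGetDest y = some d := by
  cases h : pvLastIdx rest d <;> simp [pvLastIdx, h]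

theorem pvSetD_cons (b : Bool) (l : List Bool) (s : Nat) (v : Bool) :
    PySem.List.pySetD (b :: l) ((s : Int) + 1) v = b :: PySem.List.pySetD l (s : Int) v := by
  have h1 : ((s : Int) + 1) = ((s + 1 : Nat) : Int) := by push_cast; ring
  rw [h1, PySem.List.pySetD_natCast, PySem.List.pySetD_natCast]
  rfl

theorem pvA_shift (rest : List (List (String × String))) (b : Bool) :
    ∀ (s : Nat) (out : List Bool) (seen : PySem.Set String),
    List.foldr (fun p st => pvStepA st p) (b :: out, seen)
        (PySem.List.enumerate rest ((s : Int) + 1))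
      = (b :: (List.foldr (fun p st => pvStepA st p) (out, seen)
            (PySem.List.enumerate rest (s : Int))).1,
         (List.foldr (fun p st => pvStepA st p) (out, seen)
            (PySem.List.enumerate rest (s : Int))).2) := by
  induction rest with
  | nil => intro s out seen; simp [PySem.List.enumerate]
  | cons y rest ih =>
    intro s out seen
    rw [PySem.List.enumerate_cons, PySem.List.enumerate_cons]
    simp only [List.foldr_cons]
    have h1 : ((s : Int) + 1 + 1) = (((s + 1 : Nat) : Int) + 1) := by push_cast; ring
    have h2 : ((s : Int) + 1) = ((s + 1 : Nat) : Int) := by push_cast; ring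
    rw [h1, ih (s + 1), ← h2]
    cases hd : pvGetDest y with
    | none => simp [pvStepA, hd]
    | some d =>
      simp only [pvStepA, hd]
      split_ifs with hc
      · rfl
      · simp [pvSetD_cons]

theorem pvA_seen (rest : List (List (String × String))) :
    ∀ (s : Int) (out : List Bool) (seen : PySem.Set String) (d : String),
    d ∈ (List.foldr (fun p st => pvStepA st p) (out, seen)
          (PySem.List.enumerate rest s)).2
      ↔ d ∈ seen ∨ pvLastIdx rest d ≠ none := by
  induction rest with
  | nil => intro s out seen d; simp [PySem.List.enumerate, pvLastIdx]
  | cons y rest ih =>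
    intro s out seen d
    rw [PySem.List.enumerate_cons]
    simp only [List.foldr_cons]
    rw [pvLastIdx_cons_ne_none]
    set Q := List.foldr (fun p st => pvStepA st p) (out, seen)
      (PySem.List.enumerate rest (s + 1)) with hQ
    have ihQ : ∀ e, e ∈ Q.2 ↔ e ∈ seen ∨ pvLastIdx rest e ≠ none := by
      intro e
      have h := ih (s + 1) out seen e
      rw [← hQ] at h
      exact h
    cases hd : pvGetDest y with
    | none => simp only [pvStepA, hd]; rw [ihQ]; simp
    | some dy =>
      simp only [pvStepA, hd]
      split_ifs with hc
      · rw [ihQ]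
        have hmem : dy ∈ Q.2 := (PySem.Set.contains_iff _ _).1 hc
        rw [ihQ] at hmem
        constructor
        · tauto
        · rintro (h | h | h)
          · tauto
          · tauto
          · have : dy = d := by simpa [hd] using h
            subst this; tauto
      · rw [PySem.Set.mem_add, ihQ]
        constructor
        · rintro ((h | h) | h)
          · tauto
          · tauto
          · right; right; simp [h]
        · rintro (h | h | h)
          · tauto
          · tauto
          · have : dy = d := by simpa [hd] using h
            tauto

theorem pvA_eq_spec (instrs : List (List (String × String))) :
    last_writes instrs = pvSpec instrs := by
  induction instrs with
  | nil => rfl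
  | cons x rest ih =>
    unfold last_writes at *
    rw [List.foldl_reverse] at *
    rw [PySem.List.enumerate_cons]
    simp only [List.foldr_cons, List.length_cons, List.replicate_succ]
    have h0 : (0 : Int) + 1 = ((0 : Nat) : Int) + 1 := by norm_num
    rw [h0, pvA_shift, pvSpec]
    have hcast : ((0 : Nat) : Int) = (0 : Int) := by norm_num
    rw [hcast]
    set P := List.foldr (fun p st => pvStepA st p)
      (List.replicate rest.length false, PySem.Set.empty)
      (PySem.List.enumerate rest 0) with hP
    cases hd : pvGetDest x with
    | none => simpa [pvStepA, hd] using ih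
    | some d =>
      simp only [pvStepA, hd]
      have hseen : PySem.Set.contains P.2 d = true ↔ pvLastIdx rest d ≠ none := by
        rw [PySem.Set.contains_iff, hP, pvA_seen]
        simp [PySem.Set.empty]
      split_ifs with hc
      · have : pvLastIdx rest d ≠ none := hseen.1 hc
        simp [this, ih]
      · have : ¬ pvLastIdx rest d ≠ none := fun h => hc (hseen.2 h)
        have h2 : pvLastIdx rest d = none := by tauto
        have h3 : ∀ l : List Bool, PySem.List.pySetD (false :: l) (0 : Int) true = true :: l := by
          intro l
          rw [show (0 : Int) = ((0 : Nat) : Int) from rfl, PySem.List.pySetD_natCast]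
          rfl
        simp [h3, h2, ih]

-- ===== B-side lemmas =====

theorem pvMarks_length (vals : List Int) :
    ∀ out : List Bool, (vals.foldl pvMark out).length = out.length := by
  induction vals with
  | nil => intro out; rfl
  | cons i vals ih =>
    intro out
    simp only [List.foldl_cons, ih, pvMark, PySem.List.length_pySetD]

theorem pvSpec_length (instrs : List (List (String × String))) :
    (pvSpec instrs).length = instrs.length := by
  induction instrs with
  | nil => rfl
  | cons x rest ih => simp [pvSpec, ih]

theorem pvMarks_get (vals : List Int) :
    ∀ (out : List Bool) (j : Nat), (∀ i ∈ vals, 0 ≤ i) →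
    (vals.foldl pvMark out)[j]? =
      if ((j : Int) ∈ vals ∧ j < out.length) then some true else out[j]? := by
  induction vals with
  | nil => intro out j _; simp
  | cons i vals ih =>
    intro out j hnn
    have hi : 0 ≤ i := hnn i (by simp)
    simp only [List.foldl_cons]
    rw [ih _ j (fun v hv => hnn v (by simp [hv]))]
    have hset : pvMark out i = out.set i.toNat true := by
      rw [pvMark]; exact PySem.List.pySetD_of_nonneg _ _ hi
    rw [hset, List.length_set, List.getElem?_set]
    by_cases h1 : (j : Int) ∈ vals <;> by_cases h2 : j < out.length <;>
      by_cases h3 : (j : Int) = i <;>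
      simp_all [show i.toNat = j ↔ (j:Int) = i by omega] <;>
      first
        | omega
        | (split_ifs <;> first | rfl | omega)

theorem pvBuild_nodup (l : List (Int × List (String × String))) :
    ∀ d0 : PySem.Dict String Int, d0.keys.Nodup → (l.foldl pvStepB d0).keys.Nodup := by
  induction l with
  | nil => intro d0 h; exact h
  | cons p l ih =>
    intro d0 h
    simp only [List.foldl_cons]
    apply ih
    cases hd : pvGetDest p.2 with
    | none => simpa [pvStepB, hd]
    | some d => simp only [pvStepB, hd]; exact PySem.Dict.nodup_keys_insert _ _ _ h

theorem pvBuild_get (rest : List (List (String × String))) :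
    ∀ (s : Nat) (d0 : PySem.Dict String Int) (k : String),
    ((PySem.List.enumerate rest ((s : Nat) : Int)).foldl pvStepB d0).get? k
      = match pvLastIdx rest k with
        | some j => some (((s + j : Nat) : Int))
        | none => d0.get? k := by
  induction rest with
  | nil => intro s d0 k; simp [PySem.List.enumerate, pvLastIdx]
  | cons x rest ih =>
    intro s d0 k
    rw [PySem.List.enumerate_cons]
    simp only [List.foldl_cons]
    have h1 : ((s : Int) + 1) = ((s + 1 : Nat) : Int) := by push_cast; ring
    rw [h1, ih (s + 1)]
    cases hj : pvLastIdx rest k with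
    | some j =>
      simp only [pvLastIdx, hj]
      congr 1
      push_cast
      ring
    | none =>
      simp only [pvLastIdx, hj]
      cases hd : pvGetDest x with
      | none =>
        simp [pvStepB, hd]
      | some dx =>
        simp only [pvStepB, hd]
        rw [PySem.Dict.get?_insert]
        by_cases hk : dx = k
        · subst hk; simp
        · have : ¬ (k = dx) := fun h => hk h.symm
          simp [this, hk]

theorem pvMem_values (d : PySem.Dict String Int) (hnd : d.keys.Nodup) (j : Int) :
    j ∈ d.values ↔ ∃ k, d.get? k = some j := by
  have hv : d.values = d.items.map Prod.snd := rfl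
  rw [hv, List.mem_map]
  constructor
  · rintro ⟨⟨k, v⟩, hmem, hvj⟩
    subst hvj
    exact ⟨k, by rw [PySem.Dict.get?_eq_some_iff_mem_items _ _ _ hnd]; exact hmem⟩
  · rintro ⟨k, hk⟩
    exact ⟨(k, j), by rw [← PySem.Dict.get?_eq_some_iff_mem_items _ _ _ hnd]; exact hk, rfl⟩

theorem pvB_char (instrs : List (List (String × String))) (j : Nat) :
    (last_writes_alt instrs)[j]? = some true ↔
      (j < instrs.length ∧ ∃ k, pvLastIdx instrs k = some j) := by
  unfold last_writes_alt
  set d := (PySem.List.enumerate instrs).foldl pvStepB PySem.Dict.empty with hd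
  have hnd : d.keys.Nodup := pvBuild_nodup _ _ PySem.Dict.nodup_keys_empty
  have henum : PySem.List.enumerate instrs = PySem.List.enumerate instrs (((0 : Nat) : Int)) := by
    norm_num
  have hget : ∀ k, d.get? k = match pvLastIdx instrs k with
      | some j' => some ((j' : Int))
      | none => none := by
    intro k
    rw [hd, henum, pvBuild_get instrs 0 PySem.Dict.empty k]
    cases pvLastIdx instrs k <;> simp [PySem.Dict.get?_empty]
  have hval : ∀ i : Int, i ∈ d.values ↔ ∃ k j', pvLastIdx instrs k = some j' ∧ i = (j' : Int) := by
    intro i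
    rw [pvMem_values d hnd]
    constructor
    · rintro ⟨k, hk⟩
      rw [hget k] at hk
      cases hj : pvLastIdx instrs k with
      | none => rw [hj] at hk; simp at hk
      | some j' => rw [hj] at hk; exact ⟨k, j', hj, by simpa using hk.symm⟩
    · rintro ⟨k, j', hk, rfl⟩
      exact ⟨k, by rw [hget k, hk]⟩
  have hnn : ∀ i ∈ d.values, 0 ≤ i := by
    intro i hi
    obtain ⟨k, j', _, rfl⟩ := (hval i).1 hi
    positivity
  rw [pvMarks_get _ _ j hnn, List.length_replicate]
  split_ifs with hif
  · simp only [true_iff]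
    obtain ⟨hmem, hlt⟩ := hif
    obtain ⟨k, j', hk, hcast⟩ := (hval _).1 hmem
    have : j' = j := by omega
    exact ⟨hlt, k, this ▸ hk⟩
  · rw [List.getElem?_replicate]
    constructor
    · intro h; split_ifs at h <;> simp_all
    · rintro ⟨hlt, k, hk⟩
      exact absurd ⟨(hval _).2 ⟨k, j, hk, rfl⟩, hlt⟩ hif

theorem pvSpec_char (instrs : List (List (String × String))) :
    ∀ (j : Nat), (pvSpec instrs)[j]? = some true ↔
      (j < instrs.length ∧ ∃ k, pvLastIdx instrs k = some j) := by
  induction instrs with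
  | nil => intro j; simp [pvSpec]
  | cons x rest ih =>
    intro j
    cases j with
    | zero =>
      simp only [pvSpec, List.getElem?_cons_zero, List.length_cons]
      have hrhs : (∃ k, pvLastIdx (x :: rest) k = some 0) ↔
          (∃ k, pvGetDest x = some k ∧ pvLastIdx rest k = none) := by
        constructor
        · rintro ⟨k, hk⟩
          cases hj : pvLastIdx rest k with
          | some j' => simp [pvLastIdx, hj] at hk
          | none =>
            refine ⟨k, ?_, hj⟩
            simp only [pvLastIdx, hj] at hk
            by_cases h : pvGetDest x = some k
            · exact h
            · rw [if_neg h] at hk; simp at hk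
        · rintro ⟨k, hk, hj⟩
          exact ⟨k, by simp [pvLastIdx, hj, hk]⟩
      rw [hrhs]
      cases hd : pvGetDest x with
      | none => simp
      | some d =>
        simp only [Option.some.injEq]
        constructor
        · intro h
          exact ⟨by omega, d, rfl, by simpa using h.symm⟩
        · rintro ⟨-, k, hk, hj⟩
          have : k = d := by simpa using hk.symm
          subst this
          simp [hj]
    | succ j =>
      simp only [pvSpec, List.getElem?_cons_succ, List.length_cons]
      rw [ih j]
      have : (∃ k, pvLastIdx (x :: rest) k = some (j + 1)) ↔
          (∃ k, pvLastIdx rest k = some j) := by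
        constructor
        · rintro ⟨k, hk⟩
          refine ⟨k, ?_⟩
          cases hj : pvLastIdx rest k with
          | some j' => simp only [pvLastIdx, hj] at hk; simpa using hk
          | none =>
            simp only [pvLastIdx, hj] at hk
            split_ifs at hk <;> simp_all
        · rintro ⟨k, hk⟩
          exact ⟨k, by simp [pvLastIdx, hk]⟩
      rw [this]
      constructor
      · rintro ⟨h, hx⟩; exact ⟨by omega, hx⟩
      · rintro ⟨h, hx⟩; exact ⟨by omega, hx⟩

theorem pvB_eq_spec (instrs : List (List (String × String))) :
    last_writes_alt instrs = pvSpec instrs := by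
  have hlen : (last_writes_alt instrs).length = (pvSpec instrs).length := by
    unfold last_writes_alt
    rw [pvMarks_length, List.length_replicate, pvSpec_length]
  apply List.ext_getElem?
  intro j
  by_cases hj : j < instrs.length
  · have hB : (last_writes_alt instrs)[j]?.isSome := by
      have hjB : j < (last_writes_alt instrs).length := by rw [hlen, pvSpec_length]; exact hj
      simp [List.getElem?_eq_getElem hjB]
    have hS : (pvSpec instrs)[j]?.isSome := by
      have hjS : j < (pvSpec instrs).length := by rw [pvSpec_length]; exact hj
      simp [List.getElem?_eq_getElem hjS]
    obtain ⟨bB, hbB⟩ := Option.isSome_iff_exists.1 hB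
    obtain ⟨bS, hbS⟩ := Option.isSome_iff_exists.1 hS
    have h1 := pvB_char instrs j
    have h2 := pvSpec_char instrs j
    rw [hbB] at h1
    rw [hbS] at h2
    rw [hbB, hbS]
    cases bB <;> cases bS <;> simp_all
  · have h1 : (last_writes_alt instrs)[j]? = none := by
      rw [List.getElem?_eq_none_iff, hlen, pvSpec_length]; omega
    have h2 : (pvSpec instrs)[j]? = none := by
      rw [List.getElem?_eq_none_iff, pvSpec_length]; omega
    rw [h1, h2]

-- ===== VERDICT (by name: the statement is the Claim_ definition above) =====
theorem last_writes_spec : Claim_equal_last_writes := by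
  intro instrs _
  unfold Spec_last_writes
  rw [pvA_eq_spec, pvB_eq_spec]
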